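-- pv_equiv track=rewrite | github.com/andreiclu/Python_basics | medium_hard_problems/squishing_a_list.py | squish
-- ===== SOURCE A (Python) =====
-- def squish(lst, d):
--     if not lst: return []
--     res = [lst]
--     for i in range(len(lst) - 1):
--         if d == 'left':
--             res.append([sum(res[-1][:2])] + res[-1][2:])
--         else:
--             res.append(res[-1][:-2] + [sum(res[-1][-2:])])
--     return res
-- ===== SOURCE B (Python) =====
-- def squish(lst, d):
--     if not lst:
--         return []
--     n = len(lst)
--     res = [lst]
--     if d == 'left':
--         acc = lst[0]
--         for k in range(1, n):
--             acc = acc + lst[k]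
--             res.append([acc] + lst[k+1:])
--     else:
--         acc = lst[-1]
--         for k in range(1, n):
--             acc = lst[n-k-1] + acc
--             res.append(lst[:n-k-1] + [acc])
--     return res
-- ===== Notes on version B (the rewrite author's own statement) =====
-- stated objective: alternative
-- what changed: B builds each row directly from the original list and one running scalar accumulator (row k = [acc]+lst[k+1:] or lst[:n-k-1]+[acc]), hoisting the direction test out of the loop, instead of A's chaining of each row off the previous row via slices of res[-1]; rows are O(n) shorter-lived intermediates rather than re-sliced previous rows.
import Mathlib
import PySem

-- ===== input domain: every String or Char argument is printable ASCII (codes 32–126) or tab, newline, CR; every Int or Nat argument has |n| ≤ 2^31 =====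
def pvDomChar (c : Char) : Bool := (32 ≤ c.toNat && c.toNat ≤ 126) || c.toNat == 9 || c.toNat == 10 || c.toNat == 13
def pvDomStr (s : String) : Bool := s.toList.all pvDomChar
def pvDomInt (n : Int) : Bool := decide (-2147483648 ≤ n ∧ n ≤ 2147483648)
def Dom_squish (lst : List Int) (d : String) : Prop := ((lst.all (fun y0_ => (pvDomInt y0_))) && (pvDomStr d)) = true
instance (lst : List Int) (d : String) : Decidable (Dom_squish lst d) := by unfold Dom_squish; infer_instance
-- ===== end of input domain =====

-- B builds each row directly from the original list plus one running accumulator instead of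
-- chaining each row off slices of the previous row; same asymptotic cost, different decomposition.

-- ===== PORT A =====
def squish (lst : List Int) (d : String) : List (List Int) :=
  if lst = [] then []
  else
    (PySem.List.pyRange 0 ((lst.length : Int) - 1) 1).foldl
      (fun res _ =>
        if d = "left" then
          res ++ [[(PySem.List.slice (PySem.List.pyGetD res (-1) []) none (some 2)).sum] ++
                   PySem.List.slice (PySem.List.pyGetD res (-1) []) (some 2) none]
        else
          res ++ [PySem.List.slice (PySem.List.pyGetD res (-1) []) none (some (-2)) ++
                   [(PySem.List.slice (PySem.List.pyGetD res (-1) []) (some (-2)) none).sum]])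
      [lst]

-- ===== PORT B =====
def squish_alt (lst : List Int) (d : String) : List (List Int) :=
  if lst = [] then []
  else
    let n : Int := lst.length
    if d = "left" then
      ((PySem.List.pyRange 1 n 1).foldl
        (fun (s : Int × List (List Int)) k =>
          let acc := s.1 + PySem.List.pyGetD lst k 0
          (acc, s.2 ++ [[acc] ++ PySem.List.slice lst (some (k + 1)) none]))
        (PySem.List.pyGetD lst 0 0, [lst])).2
    else
      ((PySem.List.pyRange 1 n 1).foldl
        (fun (s : Int × List (List Int)) k =>
          let acc := PySem.List.pyGetD lst (n - k - 1) 0 + s.1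
          (acc, s.2 ++ [PySem.List.slice lst none (some (n - k - 1)) ++ [acc]]))
        (PySem.List.pyGetD lst (-1) 0, [lst])).2

-- ===== PRECONDITION & SPEC =====
def Spec_squish (lst : List Int) (d : String) (out : List (List Int)) : Prop := out = squish_alt lst d
instance (lst : List Int) (d : String) (out : List (List Int)) : Decidable (Spec_squish lst d out) := by unfold Spec_squish; infer_instance

-- ===== CLAIM (what is proved, stated in full; the proofs are below) =====
def Claim_equal_squish : Prop := ∀ (lst : List Int) (d : String), Dom_squish lst d → Spec_squish lst d (squish lst d)

-- ===== LEMMAS AND PROOFS =====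

-- Row k of the 'left' (resp. 'right') squish of lst, expressed directly from lst.
def rowL (lst : List Int) (k : Nat) : List Int := (lst.take (k + 1)).sum :: lst.drop (k + 1)
def rowR (lst : List Int) (k : Nat) : List Int :=
  lst.take (lst.length - 1 - k) ++ [(lst.drop (lst.length - 1 - k)).sum]

theorem rowL_zero (lst : List Int) (h : lst ≠ []) : rowL lst 0 = lst := by
  cases lst with
  | nil => exact absurd rfl h
  | cons x xs => simp [rowL]

theorem rowR_zero (lst : List Int) (h : lst ≠ []) : rowR lst 0 = lst := by
  unfold rowR
  rw [Nat.sub_zero, List.drop_length_sub_one h, ← List.dropLast_eq_take]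
  simp [List.dropLast_append_getLast h]

theorem take_sum_succ (l : List Int) (n : Nat) (h : n < l.length) :
    (l.take (n + 1)).sum = (l.take n).sum + l[n] := by
  rw [List.take_add_one, List.getElem?_eq_getElem h, List.sum_append]; simp

theorem drop_sum_eq (l : List Int) (n : Nat) (h : n < l.length) :
    (l.drop n).sum = l[n] + (l.drop (n + 1)).sum := by
  rw [List.drop_eq_getElem_cons h, List.sum_cons]

-- last element of the first m+1 rows
theorem last_rows (row : List Int → Nat → List Int) (lst : List Int) (m : Nat) :
    PySem.List.pyGetD ((List.range (m + 1)).map (row lst)) (-1) [] = row lst m := by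
  rw [List.range_succ, List.map_append]
  exact PySem.List.pyGetD_neg_one_append_singleton _ _ _

-- ---- invariants for A's loop ----

theorem Aleft_inv (lst : List Int) (h : lst ≠ []) (m : Nat) (hm : m ≤ lst.length - 1) :
    (PySem.List.pyRange 0 (m : Int) 1).foldl
      (fun res _ =>
        res ++ [[(PySem.List.slice (PySem.List.pyGetD res (-1) []) none (some 2)).sum] ++
                 PySem.List.slice (PySem.List.pyGetD res (-1) []) (some 2) none])
      [lst] = (List.range (m + 1)).map (rowL lst) := by
  induction m with
  | zero =>
    rw [show ((0 : Nat) : Int) = 0 from rfl, PySem.List.pyRange_one_eq_nil le_rfl]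
    simp [List.range_one, rowL_zero lst h]
  | succ m ih =>
    have hm' : m ≤ lst.length - 1 := Nat.le_of_succ_le hm
    have hlt : m + 1 < lst.length := by
      have : 1 ≤ lst.length := List.length_pos_iff.mpr h
      omega
    rw [show ((m + 1 : Nat) : Int) = (m : Int) + 1 from by push_cast; ring,
        PySem.List.pyRange_one_succ_right (by exact_mod_cast Nat.zero_le m),
        List.foldl_append, ih hm']
    simp only [List.foldl_cons, List.foldl_nil]
    rw [last_rows,
        PySem.List.slice_to _ (by norm_num), PySem.List.slice_from _ (by norm_num),
        show ((2 : Int).toNat) = 2 from rfl,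
        show rowL lst m = (lst.take (m + 1)).sum :: lst[m + 1] :: lst.drop (m + 1 + 1) from by
          rw [rowL, List.drop_eq_getElem_cons hlt],
        show List.range (m + 1 + 1) = List.range (m + 1) ++ [m + 1] from List.range_succ,
        List.map_append]
    have h1 : List.take 1 (List.drop (m + 1) lst) = [lst[m + 1]] := by
      rw [List.drop_eq_getElem_cons hlt, List.take_succ_cons, List.take_zero]
    simp [rowL, take_sum_succ lst (m + 1) hlt, h1]

theorem Aright_inv (lst : List Int) (h : lst ≠ []) (m : Nat) (hm : m ≤ lst.length - 1) :
    (PySem.List.pyRange 0 (m : Int) 1).foldl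
      (fun res _ =>
        res ++ [PySem.List.slice (PySem.List.pyGetD res (-1) []) none (some (-2)) ++
                 [(PySem.List.slice (PySem.List.pyGetD res (-1) []) (some (-2)) none).sum]])
      [lst] = (List.range (m + 1)).map (rowR lst) := by
  induction m with
  | zero =>
    rw [show ((0 : Nat) : Int) = 0 from rfl, PySem.List.pyRange_one_eq_nil le_rfl]
    simp [List.range_one, rowR_zero lst h]
  | succ m ih =>
    have hm' : m ≤ lst.length - 1 := Nat.le_of_succ_le hm
    have ht : m + 2 ≤ lst.length := by
      have : 1 ≤ lst.length := List.length_pos_iff.mpr h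
      omega
    rw [show ((m + 1 : Nat) : Int) = (m : Int) + 1 from by push_cast; ring,
        PySem.List.pyRange_one_succ_right (by exact_mod_cast Nat.zero_le m),
        List.foldl_append, ih hm']
    simp only [List.foldl_cons, List.foldl_nil]
    rw [last_rows, PySem.List.slice_to_neg_ofNat _ 2 (by norm_num),
        PySem.List.slice_from_neg_ofNat _ 2 (by norm_num)]
    have hlen : (rowR lst m).length - 2 = lst.length - m - 2 := by
      simp [rowR]; omega
    have htk : lst.length - m - 2 ≤ (lst.take (lst.length - 1 - m)).length := by
      simp; omega
    have hg : lst.length - m - 2 < lst.length := by omega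
    rw [hlen]
    unfold rowR
    rw [List.take_append_of_le_length htk, List.take_take,
        show min (lst.length - m - 2) (lst.length - 1 - m) = lst.length - m - 2 from by omega,
        List.drop_append_of_le_length htk, List.drop_take,
        show lst.length - 1 - m - (lst.length - m - 2) = 1 from by omega,
        List.drop_eq_getElem_cons hg,
        show List.range (m + 1 + 1) = List.range (m + 1) ++ [m + 1] from List.range_succ,
        List.map_append]
    simp only [List.map_cons, List.map_nil,
        show lst.length - 1 - (m + 1) = lst.length - m - 2 from by omega]
    rw [drop_sum_eq lst (lst.length - m - 2) hg,
        show lst.length - m - 2 + 1 = lst.length - 1 - m from by omega]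
    simp

-- ---- invariants for B's loop ----

theorem Bleft_inv (lst : List Int) (h : lst ≠ []) (m : Nat) (hm : m ≤ lst.length - 1) :
    (PySem.List.pyRange 1 ((m : Int) + 1) 1).foldl
      (fun (s : Int × List (List Int)) k =>
        let acc := s.1 + PySem.List.pyGetD lst k 0
        (acc, s.2 ++ [[acc] ++ PySem.List.slice lst (some (k + 1)) none]))
      (PySem.List.pyGetD lst 0 0, [lst]) =
    ((lst.take (m + 1)).sum, (List.range (m + 1)).map (rowL lst)) := by
  induction m with
  | zero =>
    rw [show ((0 : Nat) : Int) + 1 = 1 from by norm_num, PySem.List.pyRange_one_eq_nil le_rfl]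
    cases lst with
    | nil => exact absurd rfl h
    | cons x xs =>
      simp [PySem.List.pyGetD_zero_cons, List.range_one, rowL]
  | succ m ih =>
    have hm' : m ≤ lst.length - 1 := Nat.le_of_succ_le hm
    have hlt : m + 1 < lst.length := by
      have : 1 ≤ lst.length := List.length_pos_iff.mpr h
      omega
    rw [show ((m + 1 : Nat) : Int) + 1 = ((m : Int) + 1) + 1 from by push_cast; ring,
        PySem.List.pyRange_one_succ_right (by exact_mod_cast Nat.succ_le_succ (Nat.zero_le m)),
        List.foldl_append, ih hm']
    simp only [List.foldl_cons, List.foldl_nil]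
    rw [show (m : Int) + 1 = ((m + 1 : Nat) : Int) from by push_cast; ring,
        PySem.List.pyGetD_natCast, List.getD_eq_getElem lst 0 hlt,
        show ((m + 1 : Nat) : Int) + 1 = ((m + 2 : Nat) : Int) from by push_cast; ring,
        PySem.List.slice_from _ (by positivity), Int.toNat_natCast,
        ← take_sum_succ lst (m + 1) hlt,
        show List.range (m + 1 + 1) = List.range (m + 1) ++ [m + 1] from List.range_succ,
        List.map_append]
    simp [rowL, show m + 1 + 1 = m + 2 from rfl]

theorem Bright_inv (lst : List Int) (h : lst ≠ []) (m : Nat) (hm : m ≤ lst.length - 1) :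
    (PySem.List.pyRange 1 ((m : Int) + 1) 1).foldl
      (fun (s : Int × List (List Int)) k =>
        let acc := PySem.List.pyGetD lst ((lst.length : Int) - k - 1) 0 + s.1
        (acc, s.2 ++ [PySem.List.slice lst none (some ((lst.length : Int) - k - 1)) ++ [acc]]))
      (PySem.List.pyGetD lst (-1) 0, [lst]) =
    ((lst.drop (lst.length - 1 - m)).sum, (List.range (m + 1)).map (rowR lst)) := by
  induction m with
  | zero =>
    rw [show ((0 : Nat) : Int) + 1 = 1 from by norm_num, PySem.List.pyRange_one_eq_nil le_rfl,
        List.foldl_nil, PySem.List.pyGetD_neg_one lst 0 h,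
        Nat.sub_zero, List.drop_length_sub_one h]
    simp [List.range_one, rowR_zero lst h]
  | succ m ih =>
    have hm' : m ≤ lst.length - 1 := Nat.le_of_succ_le hm
    have ht : m + 2 ≤ lst.length := by
      have : 1 ≤ lst.length := List.length_pos_iff.mpr h
      omega
    have hg : lst.length - m - 2 < lst.length := by omega
    rw [show ((m + 1 : Nat) : Int) + 1 = ((m : Int) + 1) + 1 from by push_cast; ring,
        PySem.List.pyRange_one_succ_right (by exact_mod_cast Nat.succ_le_succ (Nat.zero_le m)),
        List.foldl_append, ih hm']
    simp only [List.foldl_cons, List.foldl_nil]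
    rw [show (lst.length : Int) - ((m : Int) + 1) - 1 = ((lst.length - m - 2 : Nat) : Int) from by
          omega,
        PySem.List.pyGetD_natCast, List.getD_eq_getElem lst 0 hg,
        PySem.List.slice_to _ (by positivity), Int.toNat_natCast,
        show List.range (m + 1 + 1) = List.range (m + 1) ++ [m + 1] from List.range_succ,
        List.map_append,
        show lst.length - 1 - m = lst.length - m - 2 + 1 from by omega,
        ← drop_sum_eq lst (lst.length - m - 2) hg]
    have h2 : rowR lst (m + 1) =
        lst.take (lst.length - m - 2) ++ [(lst.drop (lst.length - m - 2)).sum] := by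
      unfold rowR
      rw [show lst.length - 1 - (m + 1) = lst.length - m - 2 from by omega]
    simp only [List.map_cons, List.map_nil, h2,
        show lst.length - 1 - (m + 1) = lst.length - m - 2 from by omega]

-- ===== VERDICT (by name: the statement is the Claim_ definition above) =====
theorem squish_spec : Claim_equal_squish := by
  intro lst d _
  unfold Spec_squish squish squish_alt
  by_cases hnil : lst = []
  · simp [hnil]
  · have hn : 1 ≤ lst.length := List.length_pos_iff.mpr hnil
    rw [if_neg hnil, if_neg hnil]
    have hcast : (lst.length : Int) - 1 = ((lst.length - 1 : Nat) : Int) := by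
      push_cast [Nat.cast_sub hn]; ring
    have hcast2 : ((lst.length - 1 : Nat) : Int) + 1 = (lst.length : Int) := by
      push_cast [Nat.cast_sub hn]; ring
    by_cases hd : d = "left"
    · rw [if_pos hd]
      have hA := Aleft_inv lst hnil (lst.length - 1) le_rfl
      have hB := Bleft_inv lst hnil (lst.length - 1) le_rfl
      rw [hcast2] at hB
      rw [hcast]
      calc (PySem.List.pyRange 0 ((lst.length - 1 : Nat) : Int) 1).foldl _ [lst]
          = (List.range (lst.length - 1 + 1)).map (rowL lst) := by
            rw [← hA]; apply PySem.List.foldl_congr_mem _ _ _ _; intro res b _; rw [if_pos hd]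
        _ = _ := by rw [hB]
    · rw [if_neg hd]
      have hA := Aright_inv lst hnil (lst.length - 1) le_rfl
      have hB := Bright_inv lst hnil (lst.length - 1) le_rfl
      rw [hcast2] at hB
      rw [hcast]
      calc (PySem.List.pyRange 0 ((lst.length - 1 : Nat) : Int) 1).foldl _ [lst]
          = (List.range (lst.length - 1 + 1)).map (rowR lst) := by
            rw [← hA]; apply PySem.List.foldl_congr_mem _ _ _ _; intro res b _; rw [if_neg hd]
        _ = _ := by rw [hB]
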